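-- pv_equiv track=rewrite | github.com/AlexandraKulikova/course-2130 | python/homework_1/template.py | t14
-- ===== SOURCE A (Python) =====
-- def t14(string):
--     """
--     Преобразуйте математическое выражение (символьное) в буквенное выраэение
--
--     Для операций используйте следующую таблицу
--         { '+':   'Plus ',
--           '-':   'Minus ',
--           '*':   'Times ',
--           '/':   'Divided By ',
--           '**':  'To The Power Of ',
--           '=':   'Equals ',
--           '!=':  'Does Not Equal ' }
--     Примеры:
--         4 ** 9 -> Four To The Power Of Nine
--         10 - 5 -> Ten Minus Five
--         2 = 2  -> Two Equals Two
--     """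
--     dictionary = {'+': 'Plus',
--      '-': 'Minus',
--      '**': 'To The Power Of',
--      '*': 'Times',
--      '/': 'Divided By',
--      '!=': 'Does Not Equal',
--      '=': 'Equals ',
--      '10': 'Ten',
--      '0': 'Zero',
--      '1': 'One',
--      '2': 'Two',
--      '3': 'Three',
--      '4': 'Four',
--      '5': 'Five',
--      '6': 'Six',
--      '7': 'Seven',
--      '8': 'Eight',
--      '9': 'Nine'
--      }
--
--     for i in dictionary.keys():
--         string = string.replace(i, dictionary[i])
--     return string
-- ===== SOURCE B (Python) =====
-- def t14(string):
--     two = {'**': 'To The Power Of', '!=': 'Does Not Equal', '10': 'Ten'}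
--     one = {'+': 'Plus', '-': 'Minus', '*': 'Times', '/': 'Divided By',
--            '=': 'Equals ', '0': 'Zero', '1': 'One', '2': 'Two', '3': 'Three',
--            '4': 'Four', '5': 'Five', '6': 'Six', '7': 'Seven', '8': 'Eight',
--            '9': 'Nine'}
--     pieces = []
--     i = 0
--     n = len(string)
--     while i < n:
--         pair = string[i:i + 2]
--         if pair in two:
--             pieces.append(two[pair])
--             i += 2
--         else:
--             pieces.append(one.get(string[i], string[i]))
--             i += 1
--     return ''.join(pieces)
-- ===== Notes on version B (the rewrite author's own statement) =====
-- stated objective: alternative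
-- what changed: A runs 18 sequential full-string str.replace passes (one per table key); B does a single left-to-right positional scan that checks the 2-char keys ('**','!=','10') before the 1-char keys at each index and joins the collected pieces; B trades A's repeated C-level passes for one pure-Python pass.
import Mathlib
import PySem

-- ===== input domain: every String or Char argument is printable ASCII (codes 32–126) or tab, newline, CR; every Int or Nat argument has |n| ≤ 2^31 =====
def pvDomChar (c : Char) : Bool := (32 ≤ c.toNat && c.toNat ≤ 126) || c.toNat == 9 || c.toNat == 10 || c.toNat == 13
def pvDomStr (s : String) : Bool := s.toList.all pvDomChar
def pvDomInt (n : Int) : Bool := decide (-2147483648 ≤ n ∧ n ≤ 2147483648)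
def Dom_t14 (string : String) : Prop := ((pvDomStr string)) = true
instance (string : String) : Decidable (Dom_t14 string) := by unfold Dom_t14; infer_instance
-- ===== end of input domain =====

-- B replaces A's 18 sequential full-string str.replace passes by one left-to-right positional
-- scan (2-char keys checked before 1-char keys); same output, a different traversal (no speed claim).

-- ===== PORT A =====
-- dict → association list in insertion order; the loop over dictionary.keys() is a foldl
def t14Table : List (String × String) :=
  [("+", "Plus"), ("-", "Minus"), ("**", "To The Power Of"), ("*", "Times"),
   ("/", "Divided By"), ("!=", "Does Not Equal"), ("=", "Equals "), ("10", "Ten"),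
   ("0", "Zero"), ("1", "One"), ("2", "Two"), ("3", "Three"), ("4", "Four"),
   ("5", "Five"), ("6", "Six"), ("7", "Seven"), ("8", "Eight"), ("9", "Nine")]

def t14 (string : String) : String :=
  t14Table.foldl (fun s kv => PySem.Str.replace s kv.1 kv.2) string

-- ===== PORT B =====
-- Source B's `two` dict: the 2-char keys, checked first
def t14Two? (a b : Char) : Option (List Char) :=
  if a = '*' ∧ b = '*' then some "To The Power Of".toList
  else if a = '!' ∧ b = '=' then some "Does Not Equal".toList
  else if a = '1' ∧ b = '0' then some "Ten".toList
  else none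


-- Source B's `one` dict with its `.get(string[i], string[i])` default
def t14One (c : Char) : List Char :=
  if c = '+' then "Plus".toList
  else if c = '-' then "Minus".toList
  else if c = '*' then "Times".toList
  else if c = '/' then "Divided By".toList
  else if c = '=' then "Equals ".toList
  else if c = '0' then "Zero".toList
  else if c = '1' then "One".toList
  else if c = '2' then "Two".toList
  else if c = '3' then "Three".toList
  else if c = '4' then "Four".toList
  else if c = '5' then "Five".toList
  else if c = '6' then "Six".toList
  else if c = '7' then "Seven".toList
  else if c = '8' then "Eight".toList
  else if c = '9' then "Nine".toList
  else [c]


-- Source B's while loop: look at string[i:i+2], prefer a 2-char match, else consume 1 char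
def t14Go : List Char → List Char
  | [] => []
  | [c] => t14One c
  | c1 :: c2 :: rest =>
    match t14Two? c1 c2 with
    | some w => w ++ t14Go rest
    | none => t14One c1 ++ t14Go (c2 :: rest)


def t14_alt (string : String) : String := String.ofList (t14Go string.toList)

-- ===== PRECONDITION & SPEC =====
def Spec_t14 (string : String) (out : String) : Prop := out = t14_alt string
instance (string : String) (out : String) : Decidable (Spec_t14 string out) := by unfold Spec_t14; infer_instance

-- ===== CLAIM (what is proved, stated in full; the proofs are below) =====
def Claim_equal_t14 : Prop := ∀ (string : String), Dom_t14 string → Spec_t14 string (t14 string)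

-- ===== LEMMAS AND PROOFS =====

-- a fuel-free, accumulator-free form of PySem.Chars.replace (leftmost, non-overlapping)
def rep (p w : List Char) : List Char → List Char
  | [] => []
  | c :: t =>
    if p.isPrefixOf (c :: t) then w ++ rep p w (t.drop (p.length - 1))
    else c :: rep p w t
termination_by l => l.length
decreasing_by
  all_goals simp


theorem go_eq_rep (p w : List Char) (hp : p ≠ []) :
    ∀ (fuel : Nat) (l acc : List Char), l.length ≤ fuel →
      PySem.Chars.replace.go p w fuel l acc = acc.reverse ++ rep p w l := by
  intro fuel
  induction fuel with
  | zero =>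
    intro l acc h
    have hl : l = [] := by cases l with | nil => rfl | cons a t => simp at h
    subst hl
    rw [PySem.Chars.replace.go.eq_def, rep]
  | succ n ih =>
    intro l acc h
    cases l with
    | nil => rw [PySem.Chars.replace.go.eq_def, rep]; simp
    | cons c t =>
      simp only [List.length_cons] at h
      obtain ⟨ph, pt, rfl⟩ : ∃ a b, p = a :: b := by
        cases p with | nil => exact absurd rfl hp | cons a b => exact ⟨a, b, rfl⟩
      rw [PySem.Chars.replace.go.eq_def, rep]
      by_cases hpre : (ph :: pt).isPrefixOf (c :: t)
      · simp only [hpre, if_true]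
        rw [ih (List.drop (ph :: pt).length (c :: t)) (w.reverse ++ acc)
            (by simp; omega)]
        simp
      · simp only [hpre]
        rw [ih t (c :: acc) (by omega)]
        simp


theorem replace_eq_rep0 (s p w : List Char) (hp : p ≠ []) :
    PySem.Chars.replace s p w = rep p w s := by
  unfold PySem.Chars.replace
  rw [if_neg (by simpa using hp)]
  simpa using go_eq_rep p w hp s.length s [] le_rfl

theorem replace_eq_rep' (s w : List Char) (a : Char) (p : List Char) :
    PySem.Chars.replace s (a :: p) w = rep (a :: p) w s :=
  replace_eq_rep0 s (a :: p) w (by simp)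


-- A's composite of all 18 replaces, at the char-list level
def chainF (l : List Char) : List Char :=
  rep ['9'] "Nine".toList (rep ['8'] "Eight".toList (rep ['7'] "Seven".toList
  (rep ['6'] "Six".toList (rep ['5'] "Five".toList (rep ['4'] "Four".toList
  (rep ['3'] "Three".toList (rep ['2'] "Two".toList (rep ['1'] "One".toList
  (rep ['0'] "Zero".toList (rep ['1','0'] "Ten".toList (rep ['='] "Equals ".toList
  (rep ['!','='] "Does Not Equal".toList (rep ['/'] "Divided By".toList
  (rep ['*'] "Times".toList (rep ['*','*'] "To The Power Of".toList
  (rep ['-'] "Minus".toList (rep ['+'] "Plus".toList l)))))))))))))))))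


theorem rep_nil (p w : List Char) : rep p w [] = [] := by rw [rep]

theorem rep_cons_not_prefix {p : List Char} {c : Char} {t : List Char} (w : List Char)
    (h : p.isPrefixOf (c :: t) = false) : rep p w (c :: t) = c :: rep p w t := by
  rw [rep]; simp [h]

theorem rep_one_eq (a : Char) (w t : List Char) :
    rep [a] w (a :: t) = w ++ rep [a] w t := by
  rw [rep]; simp [List.isPrefixOf]

theorem rep_one_ne {a c : Char} (w : List Char) (h : a ≠ c) (t : List Char) :
    rep [a] w (c :: t) = c :: rep [a] w t := by
  apply rep_cons_not_prefix; simp [List.isPrefixOf, h]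

theorem rep_two_eq (a b : Char) (w t : List Char) :
    rep [a, b] w (a :: b :: t) = w ++ rep [a, b] w t := by
  rw [rep]; simp [List.isPrefixOf]

theorem rep_two_ne1 {a c : Char} (b : Char) (w : List Char) (h : a ≠ c) (t : List Char) :
    rep [a, b] w (c :: t) = c :: rep [a, b] w t := by
  apply rep_cons_not_prefix; simp [List.isPrefixOf, h]

theorem rep_two_ne2 {b : Char} (a : Char) {c : Char} (w : List Char) {t : List Char}
    (h : t.head? ≠ some b) : rep [a, b] w (c :: t) = c :: rep [a, b] w t := by
  apply rep_cons_not_prefix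
  cases t with
  | nil => simp [List.isPrefixOf]
  | cons d t' => simp at h; simp [List.isPrefixOf, Ne.symm h]

theorem rep_head_ne {w : List Char} {c : Char} (p : List Char) {y : List Char}
    (hw : w ≠ []) (hwc : w.head? ≠ some c) (hy : y.head? ≠ some c) :
    (rep p w y).head? ≠ some c := by
  cases y with
  | nil => simp [rep]
  | cons d t =>
    rw [rep]
    split
    · rwa [List.head?_append_of_ne_nil _ hw]
    · simpa using hy


-- the three 2-char keys, matched by A's pass for that key after the earlier passes let both chars through
theorem step_pow (t : List Char) :
    chainF ('*' :: '*' :: t) = "To The Power Of".toList ++ chainF t := by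
  simp only [chainF]
  simp [rep_one_eq, rep_one_ne, rep_two_eq, rep_two_ne1]

theorem step_ne (t : List Char) :
    chainF ('!' :: '=' :: t) = "Does Not Equal".toList ++ chainF t := by
  simp only [chainF]
  simp [rep_one_eq, rep_one_ne, rep_two_eq, rep_two_ne1]

theorem step_ten (t : List Char) :
    chainF ('1' :: '0' :: t) = "Ten".toList ++ chainF t := by
  simp only [chainF]
  simp [rep_one_eq, rep_one_ne, rep_two_eq, rep_two_ne1]

theorem step_single (c : Char) (t : List Char)
    (hA : ¬(c = '*' ∧ t.head? = some '*'))
    (hB : ¬(c = '!' ∧ t.head? = some '='))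
    (hC : ¬(c = '1' ∧ t.head? = some '0')) :
    chainF (c :: t) = t14One c ++ chainF t := by
  by_cases h1 : c = '+'
  · subst h1; simp only [chainF, t14One]
    simp [rep_one_eq, rep_one_ne, rep_two_ne1]
  by_cases h2 : c = '-'
  · subst h2; simp only [chainF, t14One]
    simp [rep_one_eq, rep_one_ne, rep_two_ne1]
  by_cases h3 : c = '*'
  · subst h3
    have ht : t.head? ≠ some '*' := fun h => hA ⟨rfl, h⟩
    have e1 : (rep ['+'] "Plus".toList t).head? ≠ some '*' :=
      rep_head_ne _ (by decide) (by decide) ht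
    have e2 : (rep ['-'] "Minus".toList (rep ['+'] "Plus".toList t)).head? ≠ some '*' :=
      rep_head_ne _ (by decide) (by decide) e1
    simp only [chainF, t14One]
    rw [rep_one_ne _ (by decide) t, rep_one_ne _ (by decide), rep_two_ne2 _ _ e2]
    simp [rep_one_eq, rep_one_ne, rep_two_ne1]
  by_cases h4 : c = '/'
  · subst h4; simp only [chainF, t14One]
    simp [rep_one_eq, rep_one_ne, rep_two_ne1]
  by_cases h5 : c = '!'
  · subst h5
    have ht : t.head? ≠ some '=' := fun h => hB ⟨rfl, h⟩
    have e1 : (rep ['+'] "Plus".toList t).head? ≠ some '=' :=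
      rep_head_ne _ (by decide) (by decide) ht
    have e2 : (rep ['-'] "Minus".toList _).head? ≠ some '=' :=
      rep_head_ne _ (by decide) (by decide) e1
    have e3 : (rep ['*','*'] "To The Power Of".toList _).head? ≠ some '=' :=
      rep_head_ne _ (by decide) (by decide) e2
    have e4 : (rep ['*'] "Times".toList _).head? ≠ some '=' :=
      rep_head_ne _ (by decide) (by decide) e3
    have e5 : (rep ['/'] "Divided By".toList _).head? ≠ some '=' :=
      rep_head_ne _ (by decide) (by decide) e4
    simp only [chainF, t14One]
    rw [rep_one_ne _ (by decide) t, rep_one_ne _ (by decide), rep_two_ne1 _ _ (by decide),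
        rep_one_ne _ (by decide), rep_one_ne _ (by decide), rep_two_ne2 _ _ e5]
    simp [rep_one_eq, rep_one_ne, rep_two_ne1]
  by_cases h6 : c = '='
  · subst h6; simp only [chainF, t14One]
    simp [rep_one_eq, rep_one_ne, rep_two_ne1]
  by_cases h7 : c = '0'
  · subst h7; simp only [chainF, t14One]
    simp [rep_one_eq, rep_one_ne, rep_two_ne1]
  by_cases h8 : c = '1'
  · subst h8
    have ht : t.head? ≠ some '0' := fun h => hC ⟨rfl, h⟩
    have e1 : (rep ['+'] "Plus".toList t).head? ≠ some '0' :=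
      rep_head_ne _ (by decide) (by decide) ht
    have e2 : (rep ['-'] "Minus".toList _).head? ≠ some '0' :=
      rep_head_ne _ (by decide) (by decide) e1
    have e3 : (rep ['*','*'] "To The Power Of".toList _).head? ≠ some '0' :=
      rep_head_ne _ (by decide) (by decide) e2
    have e4 : (rep ['*'] "Times".toList _).head? ≠ some '0' :=
      rep_head_ne _ (by decide) (by decide) e3
    have e5 : (rep ['/'] "Divided By".toList _).head? ≠ some '0' :=
      rep_head_ne _ (by decide) (by decide) e4
    have e6 : (rep ['!','='] "Does Not Equal".toList _).head? ≠ some '0' :=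
      rep_head_ne _ (by decide) (by decide) e5
    have e7 : (rep ['='] "Equals ".toList _).head? ≠ some '0' :=
      rep_head_ne _ (by decide) (by decide) e6
    simp only [chainF, t14One]
    rw [rep_one_ne _ (by decide) t, rep_one_ne _ (by decide), rep_two_ne1 _ _ (by decide),
        rep_one_ne _ (by decide), rep_one_ne _ (by decide), rep_two_ne1 _ _ (by decide),
        rep_one_ne _ (by decide), rep_two_ne2 _ _ e7]
    simp [rep_one_eq, rep_one_ne, rep_two_ne1]
  by_cases h9 : c = '2'
  · subst h9; simp only [chainF, t14One]
    simp [rep_one_eq, rep_one_ne, rep_two_ne1]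
  by_cases h10 : c = '3'
  · subst h10; simp only [chainF, t14One]
    simp [rep_one_eq, rep_one_ne, rep_two_ne1]
  by_cases h11 : c = '4'
  · subst h11; simp only [chainF, t14One]
    simp [rep_one_eq, rep_one_ne, rep_two_ne1]
  by_cases h12 : c = '5'
  · subst h12; simp only [chainF, t14One]
    simp [rep_one_eq, rep_one_ne, rep_two_ne1]
  by_cases h13 : c = '6'
  · subst h13; simp only [chainF, t14One]
    simp [rep_one_eq, rep_one_ne, rep_two_ne1]
  by_cases h14 : c = '7'
  · subst h14; simp only [chainF, t14One]
    simp [rep_one_eq, rep_one_ne, rep_two_ne1]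
  by_cases h15 : c = '8'
  · subst h15; simp only [chainF, t14One]
    simp [rep_one_eq, rep_one_ne, rep_two_ne1]
  by_cases h16 : c = '9'
  · subst h16; simp only [chainF, t14One]
    simp [rep_one_eq, rep_one_ne, rep_two_ne1]
  · simp only [chainF, t14One]
    rw [rep_one_ne _ (Ne.symm h1) t, rep_one_ne _ (Ne.symm h2),
        rep_two_ne1 _ _ (Ne.symm h3), rep_one_ne _ (Ne.symm h3),
        rep_one_ne _ (Ne.symm h4), rep_two_ne1 _ _ (Ne.symm h5),
        rep_one_ne _ (Ne.symm h6), rep_two_ne1 _ _ (Ne.symm h8),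
        rep_one_ne _ (Ne.symm h7), rep_one_ne _ (Ne.symm h8),
        rep_one_ne _ (Ne.symm h9), rep_one_ne _ (Ne.symm h10),
        rep_one_ne _ (Ne.symm h11), rep_one_ne _ (Ne.symm h12),
        rep_one_ne _ (Ne.symm h13), rep_one_ne _ (Ne.symm h14),
        rep_one_ne _ (Ne.symm h15), rep_one_ne _ (Ne.symm h16)]
    simp [h1, h2, h3, h4, h5, h6, h7, h8, h9, h10, h11, h12, h13, h14, h15, h16]


-- a position where no 2-char key matches: exactly one of A's passes fires (or none), on that one char
theorem chain_eq_go_aux : ∀ (n : Nat) (l : List Char), l.length ≤ n → chainF l = t14Go l := by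
  intro n
  induction n with
  | zero =>
    intro l h
    have : l = [] := by cases l with | nil => rfl | cons a t => simp at h
    subst this
    simp [chainF, rep_nil, t14Go]
  | succ n ih =>
    intro l h
    cases l with
    | nil => simp [chainF, rep_nil, t14Go]
    | cons c t =>
      simp only [List.length_cons] at h
      by_cases hA : c = '*' ∧ t.head? = some '*'
      · obtain ⟨rfl, ht⟩ := hA
        obtain ⟨rest, rfl⟩ : ∃ r, t = '*' :: r := by
          cases t with
          | nil => simp at ht
          | cons d r => simp at ht; exact ⟨r, by rw [ht]⟩
        rw [step_pow, t14Go]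
        simp only [t14Two?]
        rw [ih rest (by simp at h; omega)]
        simp
      · by_cases hB : c = '!' ∧ t.head? = some '='
        · obtain ⟨rfl, ht⟩ := hB
          obtain ⟨rest, rfl⟩ : ∃ r, t = '=' :: r := by
            cases t with
            | nil => simp at ht
            | cons d r => simp at ht; exact ⟨r, by rw [ht]⟩
          rw [step_ne, t14Go]
          simp only [t14Two?]
          rw [ih rest (by simp at h; omega)]
          simp
        · by_cases hC : c = '1' ∧ t.head? = some '0'
          · obtain ⟨rfl, ht⟩ := hC
            obtain ⟨rest, rfl⟩ : ∃ r, t = '0' :: r := by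
              cases t with
              | nil => simp at ht
              | cons d r => simp at ht; exact ⟨r, by rw [ht]⟩
            rw [step_ten, t14Go]
            simp only [t14Two?]
            rw [ih rest (by simp at h; omega)]
            simp
          · rw [step_single c t hA hB hC]
            cases t with
            | nil => simp [t14Go, chainF, rep_nil]
            | cons c2 rest =>
              have h2 : t14Two? c c2 = none := by
                simp only [List.head?_cons] at hA hB hC
                rw [t14Two?, if_neg (fun ⟨x, y⟩ => hA ⟨x, by rw [y]⟩),
                    if_neg (fun ⟨x, y⟩ => hB ⟨x, by rw [y]⟩),
                    if_neg (fun ⟨x, y⟩ => hC ⟨x, by rw [y]⟩)]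
              rw [t14Go, h2]
              rw [ih (c2 :: rest) (by simpa using h)]

theorem chain_eq_go (l : List Char) : chainF l = t14Go l :=
  chain_eq_go_aux l.length l le_rfl


theorem t14_toList (s : String) : (t14 s).toList = chainF s.toList := by
  simp only [t14, t14Table, List.foldl]
  simp [PySem.Str.toList_replace, replace_eq_rep', chainF]


-- ===== VERDICT (by name: the statement is the Claim_ definition above) =====
theorem t14_spec : Claim_equal_t14 := by
  intro s _
  unfold Spec_t14 t14_alt
  rw [← chain_eq_go, ← t14_toList, String.ofList_toList]
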